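-- pv_equiv track=rewrite | github.com/unabl4/codefights | sledding_hills/sledding_hills.py | sleddingHills
-- ===== SOURCE A (Python) =====
-- def sleddingHills(enj, max_runs):
--     n = len(enj)
--     r = range(n)
--     max_enj = 0
--     while max_runs > 0:
--         max_idx = max(r, key=lambda k: enj[k]) # select max
--         if enj[max_idx] <= 0:
--             break # won't find anything
--         max_enj += enj[max_idx]
--         enj[max_idx] -= 1
--         max_runs -= 1
--
--     return max_enj
-- ===== SOURCE B (Python) =====
-- def sleddingHills(enj, max_runs):
--     # value-threshold formulation: pick values come from the sequences e, e-1, ..., 1;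
--     # binary-search the largest threshold t with count(picks >= t) >= max_runs,
--     # then sum with closed-form arithmetic series.  (Return value only: does not mutate enj.)
--     if max_runs <= 0:
--         return 0
--     hi = max(enj, default=0)
--     if hi <= 0:
--         return 0
--
--     def count_at_least(t):
--         return sum(e - t + 1 for e in enj if e >= t)
--
--     lo, best = 1, 0
--     while lo <= hi:
--         mid = (lo + hi) // 2
--         if count_at_least(mid) >= max_runs:
--             best = mid
--             lo = mid + 1
--         else:
--             hi = mid - 1
--
--     def tri(k):
--         return k * (k + 1) // 2 if k > 0 else 0
--
--     return max_runs * best + sum(tri(e - best) for e in enj)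
-- ===== Notes on version B (the rewrite author's own statement) =====
-- stated objective: faster
-- what changed: A repeatedly scans the whole list to pick and decrement the current maximum, once per run; B binary-searches a value threshold t (counting picks >= t in one pass) and sums the chosen picks with closed-form arithmetic series, never simulating individual runs; B also does not mutate enj, while A decrements it in place.
import Mathlib
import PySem

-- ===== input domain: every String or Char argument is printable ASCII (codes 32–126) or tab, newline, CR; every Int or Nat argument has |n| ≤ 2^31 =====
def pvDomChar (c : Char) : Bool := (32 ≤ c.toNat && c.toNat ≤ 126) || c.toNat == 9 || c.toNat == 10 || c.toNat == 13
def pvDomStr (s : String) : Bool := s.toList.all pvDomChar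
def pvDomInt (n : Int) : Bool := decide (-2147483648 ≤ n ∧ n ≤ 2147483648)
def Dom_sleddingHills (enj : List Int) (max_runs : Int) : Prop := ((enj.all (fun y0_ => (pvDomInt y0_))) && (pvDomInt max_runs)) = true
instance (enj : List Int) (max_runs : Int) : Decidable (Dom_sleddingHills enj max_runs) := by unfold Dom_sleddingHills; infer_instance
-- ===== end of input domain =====

-- B replaces A's pick-the-max-one-at-a-time greedy loop by a binary search on a value
-- threshold plus closed-form arithmetic series (objective: faster). Equivalence is about
-- the RETURN value only: Python A mutates enj in place (decrements entries), B does not.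

-- ===== PORT A =====
-- while max_runs > 0: max_idx = max(range(n), key=lambda k: enj[k]); break on <= 0; add; decrement.
-- The loop runs at most max_runs times, so the remaining-runs counter max_runs.toNat is the
-- structural fuel ('while max_runs > 0' is exactly 'fuel > 0').
def sleddingHillsGo : List Int → Nat → Int → Int
  | _, 0, max_enj => max_enj
  | enj, fuel + 1, max_enj =>
    match PySem.List.max? (PySem.List.pyRange 0 (enj.length : Int) 1)
        (fun k => PySem.List.pyGetD enj k 0) with
    | none => max_enj   -- Python raises ValueError here (enj = [] and max_runs > 0); outside Pre_
    | some j =>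
      if PySem.List.pyGetD enj j 0 ≤ 0 then max_enj
      else sleddingHillsGo (PySem.List.pySetD enj j (PySem.List.pyGetD enj j 0 - 1))
             fuel (max_enj + PySem.List.pyGetD enj j 0)

def sleddingHills (enj : List Int) (max_runs : Int) : Int :=
  sleddingHillsGo enj max_runs.toNat 0

-- ===== PORT B =====
-- count_at_least(t) = sum(e - t + 1 for e in enj if e >= t)
def countAtLeast (enj : List Int) (t : Int) : Int :=
  enj.foldl (fun acc e => if t ≤ e then acc + (e - t + 1) else acc) 0

-- tri(k) = k*(k+1)//2 if k > 0 else 0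
def triPy (k : Int) : Int := if 0 < k then PySem.Int.floordiv (k * (k + 1)) 2 else 0

-- while lo <= hi: mid = (lo+hi)//2; keep the largest t with count_at_least(t) >= max_runs.
-- (Source B binds mid once per iteration; it is written out here at each use, same value.)
-- Each iteration shrinks [lo, hi] by at least one, so the interval length (hi+1-lo).toNat
-- supplied at the call is structural fuel; the fuel-exhausted branch is never reached.
def bsearchGo (enj : List Int) (m : Int) : Nat → Int → Int → Int → Int
  | 0, _, _, best => best
  | fuel + 1, lo, hi, best =>
    if lo ≤ hi then
      if m ≤ countAtLeast enj (PySem.Int.floordiv (lo + hi) 2) then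
        bsearchGo enj m fuel (PySem.Int.floordiv (lo + hi) 2 + 1) hi (PySem.Int.floordiv (lo + hi) 2)
      else
        bsearchGo enj m fuel lo (PySem.Int.floordiv (lo + hi) 2 - 1) best
    else best

def sleddingHills_alt (enj : List Int) (max_runs : Int) : Int :=
  if max_runs ≤ 0 then 0
  else
    let hi := PySem.List.maxD enj (fun x => x) 0
    if hi ≤ 0 then 0
    else
      let best := bsearchGo enj max_runs hi.toNat 1 hi 0
      max_runs * best + enj.foldl (fun acc e => acc + triPy (e - best)) 0

-- ===== PRECONDITION & SPEC =====
-- Pre_ excludes only enj = [] with max_runs > 0, where Python A raises ValueError (max of empty range).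
def Pre_sleddingHills (enj : List Int) (max_runs : Int) : Prop := enj ≠ [] ∨ max_runs ≤ 0
instance (enj : List Int) (max_runs : Int) : Decidable (Pre_sleddingHills enj max_runs) := by
  unfold Pre_sleddingHills; infer_instance

def pvWitness_sleddingHills : List Int × Int := ([3, 1], 2)

def Spec_sleddingHills (enj : List Int) (max_runs : Int) (out : Int) : Prop := out = sleddingHills_alt enj max_runs
instance (enj : List Int) (max_runs : Int) (out : Int) : Decidable (Spec_sleddingHills enj max_runs out) := by unfold Spec_sleddingHills; infer_instance

-- ===== CLAIM (what is proved, stated in full; the proofs are below) =====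
def Claim_equal_sleddingHills : Prop := ∀ (enj : List Int) (max_runs : Int), Dom_sleddingHills enj max_runs → Pre_sleddingHills enj max_runs → Spec_sleddingHills enj max_runs (sleddingHills enj max_runs)

-- ===== LEMMAS AND PROOFS =====

-- fM l t = number of greedy picks of value ≥ t = Σ_e max 0 (e - t + 1)
def fM (l : List Int) (t : Int) : Int := (l.map (fun e => max 0 (e - t + 1))).sum

-- SS l m T = Σ_{t=1}^{T} min m (fM l t); this equals the greedy total (sum of the m
-- largest picks), since among the top m picks exactly min m (fM l t) have value ≥ t.
def SS (l : List Int) (m : Int) : Nat → Int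
  | 0 => 0
  | T + 1 => SS l m T + min m (fM l ((T : Int) + 1))

-- restS l a T = Σ_{t=a+1}^{T} fM l t ;  singleR e a T is its single-element column
def restS (l : List Int) (a : Int) : Nat → Int
  | 0 => 0
  | T + 1 => restS l a T + (if a < (T : Int) + 1 then fM l ((T : Int) + 1) else 0)

def singleR (e a : Int) : Nat → Int
  | 0 => 0
  | T + 1 => singleR e a T + (if a < (T : Int) + 1 then max 0 (e - ((T : Int) + 1) + 1) else 0)

lemma fM_cons (e : Int) (l : List Int) (t : Int) :
    fM (e :: l) t = max 0 (e - t + 1) + fM l t := by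
  simp [fM]

lemma fM_nonneg (l : List Int) (t : Int) : 0 ≤ fM l t := by
  induction l with
  | nil => simp [fM]
  | cons e l ih => rw [fM_cons]; have := le_max_left 0 (e - t + 1); omega

lemma fM_antitone (l : List Int) {s t : Int} (h : s ≤ t) : fM l t ≤ fM l s := by
  induction l with
  | nil => simp [fM]
  | cons e l ih => rw [fM_cons, fM_cons]; omega

lemma fM_zero_of_lt (l : List Int) (t : Int) (h : ∀ e ∈ l, e < t) : fM l t = 0 := by
  induction l with
  | nil => rfl
  | cons e l ih =>
    rw [fM_cons, ih (fun x hx => h x (List.mem_cons_of_mem _ hx))]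
    have := h e List.mem_cons_self; omega

lemma fM_pos_of_mem (l : List Int) {t v : Int} (hv : v ∈ l) (ht : t ≤ v) : 1 ≤ fM l t := by
  induction l with
  | nil => simp at hv
  | cons e l ih =>
    rw [fM_cons]
    rcases List.mem_cons.mp hv with rfl | hv'
    · have h1 := fM_nonneg l t; omega
    · have h1 := ih hv'; have := le_max_left 0 (e - t + 1); omega

-- decrementing one maximal entry removes exactly one pick of each value t ≤ v
lemma fM_set (l : List Int) (n : Nat) (hn : n < l.length) (t : Int) :
    fM (l.set n (l[n] - 1)) t = fM l t - (if t ≤ l[n] then 1 else 0) := by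
  induction l generalizing n with
  | nil => simp at hn
  | cons e l ih =>
    cases n with
    | zero =>
      simp only [List.getElem_cons_zero, List.set_cons_zero]
      rw [fM_cons, fM_cons]
      split_ifs <;> omega
    | succ n =>
      simp only [List.getElem_cons_succ, List.set_cons_succ]
      rw [fM_cons, fM_cons, ih n (by simpa using hn)]
      omega

lemma SS_zero_m (l : List Int) (T : Nat) : SS l 0 T = 0 := by
  induction T with
  | zero => rfl
  | succ T ih => rw [SS, ih]; have := fM_nonneg l ((T : Int) + 1); omega

lemma SS_zero_of_nonpos (l : List Int) (m : Int) (hm : 0 ≤ m) (h : ∀ e ∈ l, e ≤ 0) (T : Nat) :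
    SS l m T = 0 := by
  induction T with
  | zero => rfl
  | succ T ih =>
    rw [SS, ih, fM_zero_of_lt l _ (fun e he => by have := h e he; omega)]
    omega

-- one greedy step: picking a maximal positive v (at index n) removes min v T from SS
lemma SS_step (l : List Int) (m v : Int) (n : Nat) (hn : n < l.length) (hv : l[n] = v)
    (hm : 0 < m) (hvpos : 0 < v) (hmax : ∀ e ∈ l, e ≤ v) (T : Nat) :
    SS l m T = min v (T : Int) + SS (l.set n (v - 1)) (m - 1) T := by
  subst hv
  induction T with
  | zero => simp [SS]; omega
  | succ T ih =>
    rw [SS, SS, ih]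
    have hfs := fM_set l n hn ((T : Int) + 1)
    rcases le_or_gt ((T : Int) + 1) l[n] with h | h
    · -- t := T+1 ≤ v : both mins move in step, net contribution 1
      have h1 : 1 ≤ fM l ((T : Int) + 1) := fM_pos_of_mem l (l.getElem_mem hn) h
      rw [if_pos h] at hfs
      push_cast
      omega
    · -- t := T+1 > v : no pick has value T+1 in either list
      have h0 : fM l ((T : Int) + 1) = 0 :=
        fM_zero_of_lt l _ (fun e he => by have := hmax e he; omega)
      rw [if_neg (by omega)] at hfs
      push_cast
      omega

-- A's loop computes SS (the sum of the max_runs largest picks up to any bound T on enj)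
lemma go_eq_SS : ∀ (fuel : Nat) (l : List Int) (acc : Int) (T : Nat),
    l ≠ [] → (∀ e ∈ l, e ≤ (T : Int)) →
    sleddingHillsGo l fuel acc = acc + SS l (fuel : Int) T := by
  intro fuel
  induction fuel with
  | zero =>
    intro l acc T hne hb
    simp [sleddingHillsGo, SS_zero_m]
  | succ fuel ih =>
    intro l acc T hne hb
    rw [sleddingHillsGo]
    · obtain ⟨j, hj⟩ : ∃ j, PySem.List.max? (PySem.List.pyRange 0 (l.length : Int) 1)
          (fun k => PySem.List.pyGetD l k 0) = some j := by
        cases heq : PySem.List.max? (PySem.List.pyRange 0 (l.length : Int) 1)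
            (fun k => PySem.List.pyGetD l k 0) with
        | none =>
          exfalso
          have := (PySem.List.max?_eq_none_iff _ _).mp heq
          have hlen : (0 : Int) < (l.length : Int) := by
            have := List.length_pos_iff.mpr hne; exact_mod_cast this
          have : (0 : Int) ∈ PySem.List.pyRange 0 (l.length : Int) 1 :=
            PySem.List.mem_pyRange_one.mpr ⟨le_refl 0, hlen⟩
          simp_all
        | some j => exact ⟨j, rfl⟩
      simp only [hj]
      have hjmem := PySem.List.max?_mem hj
      rw [PySem.List.mem_pyRange_one] at hjmem
      obtain ⟨hj0, hjlt⟩ := hjmem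
      have hjlt' : j < (l.length : Int) := hjlt
      have hget : PySem.List.pyGetD l j 0 = l[j.toNat] := PySem.List.pyGetD_eq_getElem l 0 hj0 hjlt'
      have hjn : j.toNat < l.length := by omega
      have hmaxall : ∀ e ∈ l, e ≤ l[j.toNat] := by
        intro e he
        obtain ⟨k, hk, hke⟩ := List.mem_iff_getElem.mp he
        have hkmem : (k : Int) ∈ PySem.List.pyRange 0 (l.length : Int) 1 :=
          PySem.List.mem_pyRange_one.mpr ⟨by positivity, by exact_mod_cast hk⟩
        have := PySem.List.max?_isMax hj (k : Int) hkmem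
        rw [hget] at this
        rw [PySem.List.pyGetD_eq_getElem l 0 (by positivity) (by exact_mod_cast hk)] at this
        simpa [hke] using this
      by_cases hv : PySem.List.pyGetD l j 0 ≤ 0
      · rw [if_pos hv]
        rw [hget] at hv
        rw [SS_zero_of_nonpos l ((fuel + 1 : Nat) : Int) (by positivity)
          (fun e he => le_trans (hmaxall e he) hv) T]
        omega
      · rw [if_neg hv]
        rw [hget] at hv ⊢
        rw [PySem.List.pySetD_of_nonneg l _ hj0]
        have hvT : l[j.toNat] ≤ (T : Int) := hb _ (l.getElem_mem hjn)
        rw [ih (l.set j.toNat (l[j.toNat] - 1)) (acc + l[j.toNat]) T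
          (by intro hc
              have hlen : l.length = 0 := by simpa using congrArg List.length hc
              exact hne (List.eq_nil_of_length_eq_zero hlen))
          (by intro e he
              rcases List.mem_or_eq_of_mem_set he with h | h
              · exact hb e h
              · have := hb _ (l.getElem_mem hjn); omega)]
        have hstep := SS_step l ((fuel + 1 : Nat) : Int) l[j.toNat] j.toNat hjn rfl
          (by positivity) (by omega) hmaxall T
        have hcast : ((fuel + 1 : Nat) : Int) - 1 = (fuel : Int) := by push_cast; ring
        rw [hcast] at hstep
        have hminv : min l[j.toNat] (T : Int) = l[j.toNat] := by omega
        rw [hminv] at hstep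
        omega

-- B's count is fM
lemma countAtLeast_eq_fM (l : List Int) (t : Int) : countAtLeast l t = fM l t := by
  have key : ∀ acc : Int,
      l.foldl (fun acc e => if t ≤ e then acc + (e - t + 1) else acc) acc = acc + fM l t := by
    induction l with
    | nil => intro acc; simp [fM]
    | cons e l ih =>
      intro acc
      rw [List.foldl_cons, fM_cons]
      split_ifs with h <;> rw [ih] <;> omega
  unfold countAtLeast
  rw [key 0]
  ring

lemma triPy_rec (x : Int) : triPy x = triPy (x - 1) + max 0 x := by
  unfold triPy
  split_ifs with h1 h2 h2
  · rw [PySem.Int.floordiv_eq_ediv_of_pos (by norm_num),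
      PySem.Int.floordiv_eq_ediv_of_pos (by norm_num)]
    have hx : x * (x + 1) = (x - 1) * x + x * 2 := by ring
    rw [hx, Int.add_mul_ediv_right _ _ (by norm_num)]
    have hy : (x - 1) * (x - 1 + 1) = (x - 1) * x := by ring
    rw [hy]
    omega
  · have : x = 1 := by omega
    subst this; decide
  · omega
  · omega

lemma triPy_nonpos {x : Int} (h : x ≤ 0) : triPy x = 0 := by
  unfold triPy
  rw [if_neg (by omega)]

lemma singleR_of_ge (e a : Int) (T : Nat) (h : (T : Int) ≤ a) : singleR e a T = 0 := by
  induction T with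
  | zero => rfl
  | succ T ih =>
    have h' : (T : Int) ≤ a := by push_cast at h; omega
    rw [singleR, ih h', if_neg (by push_cast at h; omega)]
    ring

lemma singleR_eq (e a : Int) (T : Nat) (h0 : 0 ≤ a) (hT : a ≤ (T : Int)) :
    singleR e a T = triPy (e - a) - triPy (e - (T : Int)) := by
  induction T with
  | zero =>
    have : a = 0 := by exact_mod_cast le_antisymm hT h0
    subst this
    simp [singleR]
  | succ T ih =>
    push_cast at hT ⊢
    rcases le_or_gt a (T : Int) with h | h
    · rw [singleR, ih h, if_pos (by omega)]
      have hrec := triPy_rec (e - (T : Int))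
      have h1 : e - ((T : Int) + 1) + 1 = e - (T : Int) := by ring
      have h2 : e - (T : Int) - 1 = e - ((T : Int) + 1) := by ring
      rw [h1]
      rw [h2] at hrec
      omega
    · have ha : a = (T : Int) + 1 := by omega
      rw [singleR, singleR_of_ge e a T (by omega), if_neg (by omega), ha]
      simp

lemma restS_nil (a : Int) (T : Nat) : restS [] a T = 0 := by
  induction T with
  | zero => rfl
  | succ T ih => rw [restS, ih]; simp [fM]

lemma restS_cons (e : Int) (l : List Int) (a : Int) (T : Nat) :
    restS (e :: l) a T = singleR e a T + restS l a T := by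
  induction T with
  | zero => rfl
  | succ T ih =>
    rw [restS, singleR, restS, ih, fM_cons]
    split_ifs <;> omega

lemma restS_eq (l : List Int) (a : Int) (T : Nat) (h0 : 0 ≤ a) (hT : a ≤ (T : Int))
    (hb : ∀ e ∈ l, e ≤ (T : Int)) :
    restS l a T = (l.map (fun e => triPy (e - a))).sum := by
  induction l with
  | nil => simp [restS_nil]
  | cons e l ih =>
    rw [restS_cons, singleR_eq e a T h0 hT,
      (by exact triPy_nonpos (by have := hb e List.mem_cons_self; omega) :
        triPy (e - (T : Int)) = 0),
      ih (fun x hx => hb x (List.mem_cons_of_mem _ hx))]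
    simp

-- SS splits at the threshold a : m picks for each t ≤ a, all remaining picks above a
lemma SS_split (l : List Int) (m a : Int) (h0 : 0 ≤ a)
    (hge : ∀ t : Int, 1 ≤ t → t ≤ a → m ≤ fM l t)
    (hlt : ∀ t : Int, a < t → fM l t ≤ m) (T : Nat) :
    SS l m T = m * min a (T : Int) + restS l a T := by
  induction T with
  | zero => simp [SS, restS]; omega
  | succ T ih =>
    rw [SS, restS, ih]
    push_cast
    rcases le_or_gt ((T : Int) + 1) a with h | h
    · have hmin : min m (fM l ((T : Int) + 1)) = m := by
        have := hge ((T : Int) + 1) (by omega) h; omega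
      rw [hmin, if_neg (by omega),
        (by omega : min a ((T : Int) + 1) = (T : Int) + 1),
        (by omega : min a (T : Int) = (T : Int))]
      ring
    · have hle : fM l ((T : Int) + 1) ≤ m := hlt _ h
      have hf0 : 0 ≤ fM l ((T : Int) + 1) := fM_nonneg _ _
      rw [(by omega : min m (fM l ((T : Int) + 1)) = fM l ((T : Int) + 1)),
        if_pos h, (by omega : min a ((T : Int) + 1) = min a (T : Int))]
      ring

-- binary-search postcondition: it returns the largest t in [1,T0] with count ≥ m (0 if none)
lemma bsearch_post (l : List Int) (m T0 : Int) :
    ∀ (fuel : Nat) (lo hi best : Int), (hi + 1 - lo).toNat ≤ fuel →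
    best = lo - 1 → 0 ≤ best → best ≤ T0 → hi ≤ T0 →
    (best = 0 ∨ m ≤ countAtLeast l best) →
    (∀ t, hi < t → t ≤ T0 → countAtLeast l t < m) →
    0 ≤ bsearchGo l m fuel lo hi best ∧ bsearchGo l m fuel lo hi best ≤ T0 ∧
      (bsearchGo l m fuel lo hi best = 0 ∨ m ≤ countAtLeast l (bsearchGo l m fuel lo hi best)) ∧
      (∀ t, bsearchGo l m fuel lo hi best < t → t ≤ T0 → countAtLeast l t < m) := by
  intro fuel
  induction fuel with
  | zero =>
    intro lo hi best hf hbl hb0 hbT hhiT hP hN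
    rw [bsearchGo]
    exact ⟨hb0, hbT, hP, fun t ht1 ht2 => hN t (by omega) ht2⟩
  | succ fuel ih =>
    intro lo hi best hf hbl hb0 hbT hhiT hP hN
    rw [bsearchGo]
    by_cases hlh : lo ≤ hi
    · rw [if_pos hlh]
      have hmid := PySem.Int.floordiv_two_mid_bounds hlh
      by_cases hc : m ≤ countAtLeast l (PySem.Int.floordiv (lo + hi) 2)
      · rw [if_pos hc]
        exact ih _ hi _ (by omega) (by omega) (by omega) (by omega) hhiT (Or.inr hc) hN
      · rw [if_neg hc]
        refine ih lo _ best (by omega) hbl hb0 hbT (by omega) hP ?_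
        intro t ht1 ht2
        rcases le_or_gt t hi with h | h
        · have hanti : countAtLeast l t ≤ countAtLeast l (PySem.Int.floordiv (lo + hi) 2) := by
            rw [countAtLeast_eq_fM, countAtLeast_eq_fM]
            exact fM_antitone l (by omega)
          omega
        · exact hN t h ht2
    · rw [if_neg hlh]
      exact ⟨hb0, hbT, hP, fun t ht1 ht2 => hN t (by omega) ht2⟩

-- ===== VERDICT (by name: the statement is the Claim_ definition above) =====
theorem sleddingHills_spec : Claim_equal_sleddingHills := by
  intro enj m _dom hpre
  unfold Spec_sleddingHills
  show sleddingHills enj m = sleddingHills_alt enj m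
  unfold sleddingHills
  simp only [sleddingHills_alt, PySem.List.maxD]
  by_cases hm : m ≤ 0
  · rw [if_pos hm, (by omega : m.toNat = 0)]
    rfl
  · rw [if_neg hm]
    have hne : enj ≠ [] := by
      rcases hpre with h | h
      · exact h
      · omega
    obtain ⟨mx, hmx⟩ : ∃ mx, PySem.List.max? enj (fun x => x) = some mx := by
      cases heq : PySem.List.max? enj (fun x => x) with
      | none => exact absurd ((PySem.List.max?_eq_none_iff _ _).mp heq) hne
      | some mx => exact ⟨mx, rfl⟩
    have hmxmem : mx ∈ enj := PySem.List.max?_mem hmx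
    have hmxmax : ∀ e ∈ enj, e ≤ mx := PySem.List.max?_isMax hmx
    rw [hmx]
    simp only [Option.getD_some]
    by_cases hmx0 : mx ≤ 0
    · rw [if_pos hmx0]
      rw [go_eq_SS m.toNat enj 0 0 hne
        (fun e he => by have := hmxmax e he; simpa using by omega)]
      simp [SS]
    · rw [if_neg hmx0]
      have hTcast : (mx.toNat : Int) = mx := Int.toNat_of_nonneg (by omega)
      have hbnd : ∀ e ∈ enj, e ≤ (mx.toNat : Int) := by
        intro e he; rw [hTcast]; exact hmxmax e he
      rw [go_eq_SS m.toNat enj 0 mx.toNat hne hbnd,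
        Int.toNat_of_nonneg (by omega : (0 : Int) ≤ m)]
      obtain ⟨hR0, hRT, hRP, hRN⟩ :=
        bsearch_post enj m mx mx.toNat 1 mx 0 (by omega) (by ring) le_rfl (by omega)
          le_rfl (Or.inl rfl) (fun t ht1 ht2 => by omega)
      have hge : ∀ t : Int, 1 ≤ t → t ≤ bsearchGo enj m mx.toNat 1 mx 0 → m ≤ fM enj t := by
        intro t ht1 ht2
        rcases hRP with h | h
        · omega
        · rw [countAtLeast_eq_fM] at h
          exact le_trans h (fM_antitone enj ht2)
      have hlt : ∀ t : Int, bsearchGo enj m mx.toNat 1 mx 0 < t → fM enj t ≤ m := by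
        intro t ht
        rcases le_or_gt t mx with h | h
        · have := hRN t ht h
          rw [countAtLeast_eq_fM] at this
          omega
        · rw [fM_zero_of_lt enj t (fun e he => by have := hmxmax e he; omega)]
          omega
      have hsplit := SS_split enj m (bsearchGo enj m mx.toNat 1 mx 0) hR0 hge hlt mx.toNat
      rw [(by omega : min (bsearchGo enj m mx.toNat 1 mx 0) (mx.toNat : Int) = bsearchGo enj m mx.toNat 1 mx 0)]
        at hsplit
      rw [hsplit,
        restS_eq enj (bsearchGo enj m mx.toNat 1 mx 0) mx.toNat hR0 (by omega) hbnd,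
        PySem.List.foldl_add enj (fun e => triPy (e - bsearchGo enj m mx.toNat 1 mx 0)) 0]
      omega
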